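-- pv_equiv track=rewrite | github.com/daven-park/BOJG | 백준/Silver/9020. 골드바흐의 추측/골드바흐의 추측.py | find_prime_twopointer
-- ===== SOURCE A (Python) =====
-- def find_prime_twopointer(target, prime_list):
--     ans = []
--     left = 0
--     right = len(prime_list) - 1
--     while left <= right:
--         total = prime_list[left] + prime_list[right]
--         if total == target:
--             ans.append((prime_list[left], prime_list[right]))
--             left += 1
--             right -= 1
--         elif total < target:
--             left += 1
--         else:
--             right -= 1
--     return ans
-- ===== SOURCE B (Python) =====
-- def find_prime_twopointer(target, prime_list):
--     prime_set = set(prime_list)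
--     ans = []
--     for p in prime_list:
--         if 2 * p <= target and (target - p) in prime_set:
--             ans.append((p, target - p))
--     return ans
-- ===== Notes on version B (the rewrite author's own statement) =====
-- stated objective: idiomatic
-- what changed: Replaces the coordinated two-pointer inward walk with a single forward pass plus constant-time set-membership lookups (pair kept when 2*p <= target and target-p is present).
-- outside the precondition, e.g. on find_prime_twopointer(5, [3, 2]): A returns [(3, 2)], B returns [(2, 3)]; on find_prime_twopointer(4, [2, 2]): A returns [(2, 2)], B returns [(2, 2), (2, 2)]
import Mathlib
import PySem

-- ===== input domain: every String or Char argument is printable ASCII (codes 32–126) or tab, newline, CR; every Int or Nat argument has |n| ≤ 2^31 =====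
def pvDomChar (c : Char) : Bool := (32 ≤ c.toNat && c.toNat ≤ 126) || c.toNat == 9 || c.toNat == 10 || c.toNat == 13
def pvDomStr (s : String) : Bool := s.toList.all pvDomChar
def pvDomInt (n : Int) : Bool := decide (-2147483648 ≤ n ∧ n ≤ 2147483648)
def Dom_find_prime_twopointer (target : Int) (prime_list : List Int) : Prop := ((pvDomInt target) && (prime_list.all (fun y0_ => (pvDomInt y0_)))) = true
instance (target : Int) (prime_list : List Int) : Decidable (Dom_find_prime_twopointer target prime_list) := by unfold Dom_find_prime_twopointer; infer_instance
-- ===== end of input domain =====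

-- B replaces A's two-pointer inward walk by a single forward pass with set-membership tests; equivalence is proved on strictly increasing input lists (the function's contract).

-- ===== PORT A =====
-- while left <= right loop of A; the `| _, _ => ans` arm only makes the match total:
-- from the entry call the indices always satisfy 0 ≤ left ≤ right < len, so pyGet? never returns none.
def pvLoopA (target : Int) (xs : List Int) (left right : Int) (ans : List (Int × Int)) : List (Int × Int) :=
  if left ≤ right then
    match PySem.List.pyGet? xs left, PySem.List.pyGet? xs right with
    | some a, some b =>
      let total := a + b
      if total = target then pvLoopA target xs (left + 1) (right - 1) (ans ++ [(a, b)])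
      else if total < target then pvLoopA target xs (left + 1) right ans
      else pvLoopA target xs left (right - 1) ans
    | _, _ => ans
  else ans
termination_by (right + 1 - left).toNat
decreasing_by all_goals omega

def find_prime_twopointer (target : Int) (prime_list : List Int) : List (Int × Int) :=
  pvLoopA target prime_list 0 ((prime_list.length : Int) - 1) []

-- ===== PORT B =====
def find_prime_twopointer_alt (target : Int) (prime_list : List Int) : List (Int × Int) :=
  let prime_set : PySem.Set Int := PySem.Set.ofList prime_list
  prime_list.foldl
    (fun ans p => if 2 * p ≤ target ∧ (target - p) ∈ prime_set then ans ++ [(p, target - p)] else ans) []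

-- ===== PRECONDITION & SPEC =====
-- Pre_ admits the function's contract — a strictly increasing list (sorted, no duplicates), as a
-- prime sieve produces — and additionally every list in which no two elements sum to target (there
-- both sides trivially return []).  Excluded are unsorted/duplicated lists containing a pair that
-- sums to target: there A's two-pointer walk returns an accidental subsequence of pair encounters
-- and B's forward pass another equally defensible list; neither order/multiset is specified.
def Pre_find_prime_twopointer (target : Int) (prime_list : List Int) : Prop :=
  List.Pairwise (· < ·) prime_list ∨ (∀ p ∈ prime_list, ∀ q ∈ prime_list, p + q ≠ target)
instance (target : Int) (prime_list : List Int) : Decidable (Pre_find_prime_twopointer target prime_list) := by unfold Pre_find_prime_twopointer; infer_instance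

def pvWitness_find_prime_twopointer : Int × List Int := (10, [3, 5, 7])

def Spec_find_prime_twopointer (target : Int) (prime_list : List Int) (out : List (Int × Int)) : Prop := out = find_prime_twopointer_alt target prime_list
instance (target : Int) (prime_list : List Int) (out : List (Int × Int)) : Decidable (Spec_find_prime_twopointer target prime_list out) := by unfold Spec_find_prime_twopointer; infer_instance

-- ===== CLAIM (what is proved, stated in full; the proofs are below) =====
def Claim_equal_find_prime_twopointer : Prop := ∀ (target : Int) (prime_list : List Int), Dom_find_prime_twopointer target prime_list → Pre_find_prime_twopointer target prime_list → Spec_find_prime_twopointer target prime_list (find_prime_twopointer target prime_list)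

-- ===== LEMMAS AND PROOFS =====

-- the common characterisation: all pairs (p, target-p) with 2p ≤ target and target-p in the list
def pvF (target : Int) (ys : List Int) : List (Int × Int) :=
  (ys.filter (fun p => decide (2 * p ≤ target ∧ (target - p) ∈ ys))).map (fun p => (p, target - p))

-- the segment xs[l..r] that the two-pointer loop still works on
def pvSeg (xs : List Int) (l r : Int) : List Int :=
  (xs.drop l.toNat).take (r + 1 - l).toNat

lemma pv_foldl_if_append {α β : Type} (p : α → Prop) [DecidablePred p] (f : α → β) (l : List α)
    (acc : List β) :
    l.foldl (fun a x => if p x then a ++ [f x] else a) acc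
      = acc ++ (l.filter (fun x => decide (p x))).map f := by
  induction l generalizing acc with
  | nil => simp
  | cons x l ih =>
    by_cases h : p x <;> simp [h, ih]

lemma pv_alt_eq_F (target : Int) (xs : List Int) :
    find_prime_twopointer_alt target xs = pvF target xs := by
  unfold find_prime_twopointer_alt pvF
  rw [pv_foldl_if_append (fun p => 2 * p ≤ target ∧ (target - p) ∈ PySem.Set.ofList xs)]
  simp only [List.nil_append]
  congr 1
  apply List.filter_congr
  intro p _
  simp [PySem.Set.mem_ofList]

lemma pv_seg_cons (xs : List Int) (l r : Int) (h0 : 0 ≤ l) (hlr : l ≤ r) (hr : r < xs.length) :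
    pvSeg xs l r = xs[l.toNat]'(by omega) :: pvSeg xs (l + 1) r := by
  unfold pvSeg
  rw [List.drop_eq_getElem_cons (by omega)]
  have h1 : (r + 1 - l).toNat = (r + 1 - (l + 1)).toNat + 1 := by omega
  have h2 : l.toNat + 1 = (l + 1).toNat := by omega
  rw [h1, List.take_succ_cons, h2]

lemma pv_seg_snoc (xs : List Int) (l r : Int) (h0 : 0 ≤ l) (hlr : l ≤ r) (hr : r < xs.length) :
    pvSeg xs l r = pvSeg xs l (r - 1) ++ [xs[r.toNat]'(by omega)] := by
  unfold pvSeg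
  have h1 : (r + 1 - l).toNat = (r - l).toNat + 1 := by omega
  have h2 : (r - 1 + 1 - l).toNat = (r - l).toNat := by omega
  rw [h1, h2, List.take_add_one]
  congr 1
  have hlen : (r - l).toNat < (xs.drop l.toNat).length := by
    rw [List.length_drop]; omega
  rw [List.getElem?_eq_getElem hlen, List.getElem_drop]
  have : l.toNat + (r - l).toNat = r.toNat := by omega
  simp [this]

lemma pv_mem_seg (xs : List Int) (l r : Int) (x : Int) (h0 : 0 ≤ l) (hx : x ∈ pvSeg xs l r) :
    ∃ j : Nat, l.toNat ≤ j ∧ (j : Int) ≤ r ∧ ∃ hj : j < xs.length, xs[j] = x := by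
  unfold pvSeg at hx
  obtain ⟨i, hi, hieq⟩ := List.mem_iff_getElem.mp hx
  have hi' : i < (r + 1 - l).toNat ∧ i < (xs.drop l.toNat).length := by
    constructor
    · exact lt_of_lt_of_le hi (by simp [List.length_take])
    · exact lt_of_lt_of_le hi (by simp [List.length_take])
  rw [List.getElem_take, List.getElem_drop] at hieq
  refine ⟨l.toNat + i, by omega, by omega, ?_, hieq⟩
  have := hi'.2
  rw [List.length_drop] at this
  omega

-- bounds on elements of a segment, from strict sortedness
lemma pv_seg_bounds (xs : List Int) (hs : List.Pairwise (· < ·) xs) (l r : Int) (x : Int)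
    (h0 : 0 ≤ l) (hx : x ∈ pvSeg xs l r) (i : Nat) (hi : i < xs.length) :
    ((i : Int) ≤ l → xs[i] ≤ x) ∧ ((i : Int) < l → xs[i] < x) ∧
    (r ≤ (i : Int) → x ≤ xs[i]) ∧ (r < (i : Int) → x < xs[i]) := by
  obtain ⟨j, hlj, hjr, hj, hjeq⟩ := pv_mem_seg xs l r x h0 hx
  have hpw := List.pairwise_iff_getElem.mp hs
  subst hjeq
  refine ⟨?_, ?_, ?_, ?_⟩ <;> intro h
  · rcases Nat.lt_or_ge i j with h' | h'
    · exact le_of_lt (hpw i j hi hj h')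
    · have : i = j := by omega
      subst this; exact le_refl _
  · exact hpw i j hi hj (by omega)
  · rcases Nat.lt_or_ge j i with h' | h'
    · exact le_of_lt (hpw j i hj hi h')
    · have : j = i := by omega
      subst this; exact le_refl _
  · exact hpw j i hj hi (by omega)

lemma pv_F_cons_skip (target h : Int) (ys : List Int)
    (hmem : (target - h) ∉ (h :: ys)) (hnp : ∀ p ∈ ys, h + p ≠ target) :
    pvF target (h :: ys) = pvF target ys := by
  unfold pvF
  rw [List.filter_cons_of_neg (by simp [hmem])]
  congr 1
  apply List.filter_congr
  intro p hp
  have hne : target - p ≠ h := fun e => hnp p hp (by omega)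
  simp [List.mem_cons, hne]

lemma pv_F_cons_match (target h : Int) (ys : List Int)
    (h2 : 2 * h ≤ target) (hmem : (target - h) ∈ h :: ys)
    (hnp : ∀ p ∈ ys, 2 * p ≤ target → target - p ≠ h) :
    pvF target (h :: ys) = (h, target - h) :: pvF target ys := by
  unfold pvF
  rw [List.filter_cons_of_pos (by simp [h2, hmem])]
  rw [List.map_cons]
  congr 2
  apply List.filter_congr
  intro p hp
  by_cases hq : 2 * p ≤ target
  · have hne : target - p ≠ h := hnp p hp hq
    simp [List.mem_cons, hne]
  · simp [hq]

lemma pv_F_snoc_skip (target t : Int) (ys : List Int)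
    (h2 : ¬ 2 * t ≤ target) (hnp : ∀ p ∈ ys, target - p ≠ t) :
    pvF target (ys ++ [t]) = pvF target ys := by
  unfold pvF
  rw [List.filter_append]
  have ht : List.filter (fun p => decide (2 * p ≤ target ∧ (target - p) ∈ ys ++ [t])) [t] = [] := by
    simp [h2]
  rw [ht, List.append_nil]
  congr 1
  apply List.filter_congr
  intro p hp
  have hne : target - p ≠ t := hnp p hp
  simp [List.mem_append, hne]

lemma pv_loop_nopair (target : Int) (xs : List Int)
    (hnp : ∀ p ∈ xs, ∀ q ∈ xs, p + q ≠ target) :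
    ∀ (n : Nat) (l r : Int) (ans : List (Int × Int)), (r + 1 - l).toNat = n →
      pvLoopA target xs l r ans = ans := by
  intro n
  induction n using Nat.strong_induction_on with
  | _ n ih =>
    intro l r ans hn
    rw [pvLoopA]
    by_cases hlr : l ≤ r
    · rw [if_pos hlr]
      rcases hga : PySem.List.pyGet? xs l with _ | a
      · rfl
      rcases hgb : PySem.List.pyGet? xs r with _ | b
      · rfl
      have hma := PySem.List.mem_of_pyGet?_eq_some xs hga
      have hmb := PySem.List.mem_of_pyGet?_eq_some xs hgb
      simp only []
      rw [if_neg (hnp a hma b hmb)]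
      by_cases hlt : a + b < target
      · rw [if_pos hlt]
        exact ih (r + 1 - (l + 1)).toNat (by omega) (l + 1) r ans rfl
      · rw [if_neg hlt]
        exact ih (r - 1 + 1 - l).toNat (by omega) l (r - 1) ans rfl
    · rw [if_neg hlr]

lemma pv_F_nopair (target : Int) (xs : List Int)
    (hnp : ∀ p ∈ xs, ∀ q ∈ xs, p + q ≠ target) :
    pvF target xs = [] := by
  unfold pvF
  rw [List.filter_eq_nil_iff.mpr, List.map_nil]
  intro p hp
  simp only [decide_eq_true_eq, not_and]
  intro _ hmem
  exact hnp p hp (target - p) hmem (by omega)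

lemma pv_loop_eq (target : Int) (xs : List Int) (hs : List.Pairwise (· < ·) xs) :
    ∀ (n : Nat) (l r : Int) (ans : List (Int × Int)), 0 ≤ l → r < xs.length →
      (r + 1 - l).toNat = n →
      pvLoopA target xs l r ans = ans ++ pvF target (pvSeg xs l r) := by
  intro n
  induction n using Nat.strong_induction_on with
  | _ n ih =>
    intro l r ans h0 hr hn
    rw [pvLoopA]
    by_cases hlr : l ≤ r
    · have hlnat : l.toNat < xs.length := by omega
      have hrnat : r.toNat < xs.length := by omega
      rw [if_pos hlr, PySem.List.pyGet?_eq_some_getElem xs (i := l) h0 (by omega),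
        PySem.List.pyGet?_eq_some_getElem xs (i := r) (by omega) (by omega)]
      simp only []
      set a := xs[l.toNat] with ha
      set b := xs[r.toNat] with hb
      have hab : a ≤ b := by
        rcases Nat.lt_or_ge l.toNat r.toNat with h' | h'
        · exact le_of_lt (List.pairwise_iff_getElem.mp hs l.toNat r.toNat hlnat hrnat h')
        · have : l.toNat = r.toNat := by omega
          rw [ha, hb]
          exact le_of_eq (by congr 1)
      have hconsS := pv_seg_cons xs l r h0 hlr hr
      have hsnocS := pv_seg_snoc xs l r h0 hlr hr
      by_cases heq : a + b = target
      · rw [if_pos heq]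
        rw [ih (r - 1 + 1 - (l + 1)).toNat (by omega) (l + 1) (r - 1) _ (by omega) (by omega) rfl]
        rw [List.append_assoc]
        congr 1
        have hstep1 : pvF target (pvSeg xs l r) = (a, target - a) :: pvF target (pvSeg xs (l + 1) r) := by
          rw [hconsS]
          apply pv_F_cons_match
          · omega
          · have : target - a = b := by omega
            rw [this, ← hconsS, hsnocS]
            simp only [List.mem_append, List.mem_singleton]
            right
            exact hb
          · intro p hp hple hcontra
            have hgt : a < p := (pv_seg_bounds xs hs (l + 1) r p (by omega) hp l.toNat hlnat).2.1 (by omega)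
            have : p = b := by omega
            omega
        have hstep2 : pvF target (pvSeg xs (l + 1) r) = pvF target (pvSeg xs (l + 1) (r - 1)) := by
          by_cases hlr' : l + 1 ≤ r
          · rw [pv_seg_snoc xs (l + 1) r (by omega) hlr' hr]
            apply pv_F_snoc_skip
            · have : a < b := by
                have h' : l.toNat < r.toNat := by
                  rcases Nat.lt_or_ge l.toNat r.toNat with h' | h'
                  · exact h'
                  · exfalso
                    have : l.toNat = r.toNat := by omega
                    have hab' : a = b := by rw [ha, hb]; congr 1
                    omega
                exact List.pairwise_iff_getElem.mp hs l.toNat r.toNat hlnat hrnat h'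
              omega
            · intro p hp hcontra
              have hgt : a < p := (pv_seg_bounds xs hs (l + 1) (r - 1) p (by omega) hp l.toNat hlnat).2.1 (by omega)
              omega
          · have e1 : pvSeg xs (l + 1) r = [] := by
              unfold pvSeg
              have : (r + 1 - (l + 1)).toNat = 0 := by omega
              rw [this, List.take_zero]
            have e2 : pvSeg xs (l + 1) (r - 1) = [] := by
              unfold pvSeg
              have : (r - 1 + 1 - (l + 1)).toNat = 0 := by omega
              rw [this, List.take_zero]
            rw [e1, e2]
        rw [hstep1, hstep2]
        have : target - a = b := by omega
        simp [this]
      · rw [if_neg heq]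
        by_cases hlt : a + b < target
        · rw [if_pos hlt]
          rw [ih (r + 1 - (l + 1)).toNat (by omega) (l + 1) r ans (by omega) hr rfl]
          congr 1
          symm
          rw [hconsS]
          apply pv_F_cons_skip
          · rw [← hconsS]
            intro hmem
            have := (pv_seg_bounds xs hs l r (target - a) h0 hmem r.toNat hrnat).2.2.1 (by omega)
            omega
          · intro p hp
            have hle : p ≤ b := (pv_seg_bounds xs hs (l + 1) r p (by omega) hp r.toNat hrnat).2.2.1 (by omega)
            omega
        · rw [if_neg hlt]
          rw [ih (r - 1 + 1 - l).toNat (by omega) l (r - 1) ans h0 (by omega) rfl]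
          congr 1
          symm
          rw [hsnocS]
          apply pv_F_snoc_skip
          · omega
          · intro p hp hcontra
            have hge : a ≤ p := (pv_seg_bounds xs hs l (r - 1) p h0 hp l.toNat hlnat).1 (by omega)
            omega
    · rw [if_neg hlr]
      have : pvSeg xs l r = [] := by
        unfold pvSeg
        have h2 : (r + 1 - l).toNat = 0 := by omega
        rw [h2, List.take_zero]
      rw [this]
      simp [pvF]

-- ===== VERDICT (by name: the statement is the Claim_ definition above) =====
theorem find_prime_twopointer_spec : Claim_equal_find_prime_twopointer := by
  intro target xs _hdom hpre
  unfold Spec_find_prime_twopointer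
  unfold find_prime_twopointer
  rcases hpre with hs | hnp
  case inr =>
    rw [pv_loop_nopair target xs hnp ((xs.length : Int) - 1 + 1 - 0).toNat 0 ((xs.length : Int) - 1) [] rfl,
      pv_alt_eq_F, pv_F_nopair target xs hnp]
  rw [pv_loop_eq target xs hs ((xs.length : Int) - 1 + 1 - 0).toNat 0 ((xs.length : Int) - 1) []
    (by omega) (by omega) rfl]
  have : pvSeg xs 0 ((xs.length : Int) - 1) = xs := by
    unfold pvSeg
    simp
  rw [this, pv_alt_eq_F, List.nil_append]
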